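-- pv_equiv track=rewrite | github.com/among/fusus | fusus/lakhnawi.py | getToc
-- ===== SOURCE A (Python) =====
-- def getToc(pageNums):
--     """Generate a Table Of Contents for multiple HTML pages.
--
--     Parameter
--     ---------
--     pageNums: iterable if int
--         The page numbers of the pages in the HTML file.
--     """
--
--     limit = 60
--
--     html = []
--     html.append("""<div class="toc">""")
--     j = 0
--
--     for (i, pageNum) in enumerate(pageNums):
--         if j == limit:
--             j = 0
--             html.append("""</div>\n<div class="toc">""")
--         html.append(f"""<a href="#p{pageNum:>03}">p {pageNum}</a><br>""")
--         j += 1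
--
--     html.append("""</div>""")
--
--     return "\n".join(html)
-- ===== SOURCE B (Python) =====
-- def getToc(pageNums):
--     """Generate a Table Of Contents for multiple HTML pages.
--
--     Chunked decomposition: slice the page list into blocks of 60 and emit
--     each block between div boundaries, instead of a modular counter.
--     """
--     pages = list(pageNums)
--     html = ['<div class="toc">']
--     first = True
--     while pages:
--         if not first:
--             html.append('</div>\n<div class="toc">')
--         first = False
--         for pageNum in pages[:60]:
--             html.append(f"""<a href="#p{pageNum:>03}">p {pageNum}</a><br>""")
--         pages = pages[60:]
--     html.append('</div>')
--     return "\n".join(html)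
-- ===== Notes on version B (the rewrite author's own statement) =====
-- stated objective: alternative
-- what changed: Replaces the single pass with a modular counter (j reset at 60 inside an enumerate loop) by an outer chunking loop that slices the page list into blocks of 60 and emits each block between div boundaries.
import Mathlib
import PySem

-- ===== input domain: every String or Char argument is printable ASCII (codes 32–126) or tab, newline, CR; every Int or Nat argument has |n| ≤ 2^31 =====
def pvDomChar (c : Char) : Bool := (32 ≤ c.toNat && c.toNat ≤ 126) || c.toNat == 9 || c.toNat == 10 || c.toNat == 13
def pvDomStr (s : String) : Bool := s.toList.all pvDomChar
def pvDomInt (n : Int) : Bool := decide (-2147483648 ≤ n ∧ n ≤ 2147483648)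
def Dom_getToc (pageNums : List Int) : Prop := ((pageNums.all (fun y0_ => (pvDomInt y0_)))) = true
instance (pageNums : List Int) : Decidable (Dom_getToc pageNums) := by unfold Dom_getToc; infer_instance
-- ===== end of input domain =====

-- B replaces A's modular counter (j reset at 60) by an outer loop over 60-page chunks; same output, similar cost (objective: alternative).

-- ===== PORT A =====
-- f'<a href="#p{n:>03}">p {n}</a><br>': '>03' right-aligns str(n) in width 3, fill '0'
-- placed left of the whole rendered string (sign included) — hand port, exact for str(int).
def pvEntry (n : Int) : String :=
  let s := PySem.Int.toChars n
  String.ofList ("<a href=\"#p".toList ++ List.replicate (3 - s.length) '0' ++ s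
             ++ "\">p ".toList ++ s ++ "</a><br>".toList)

def pvStepA (st : List String × Int) (p : Int × Int) : List String × Int :=
  let (html, j) := st
  let (html, j) := if j == (60 : Int) then (html ++ ["</div>\n<div class=\"toc\">"], (0 : Int)) else (html, j)
  (html ++ [pvEntry p.2], j + 1)

def getToc (pageNums : List Int) : String :=
  let html : List String := ["<div class=\"toc\">"]
  let st := (PySem.List.enumerate pageNums).foldl pvStepA (html, 0)
  let html := st.1 ++ ["</div>"]
  PySem.Str.join "\n" html

-- ===== PORT B =====
def pvLoopB (pages : List Int) (html : List String) (first : Bool) : List String :=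
  if h : pages = [] then html
  else
    let html := if first then html else html ++ ["</div>\n<div class=\"toc\">"]
    let html := (PySem.List.slice pages none (some 60)).foldl (fun acc n => acc ++ [pvEntry n]) html
    pvLoopB (PySem.List.slice pages (some 60) none) html false
termination_by pages.length
decreasing_by
  rw [PySem.List.slice_from _ (by omega : (0:Int) ≤ 60), List.length_drop]
  have hp : 0 < pages.length := List.length_pos_of_ne_nil h
  omega

def getToc_alt (pageNums : List Int) : String :=
  let pages := pageNums
  let html : List String := ["<div class=\"toc\">"]
  let html := pvLoopB pages html true
  let html := html ++ ["</div>"]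
  PySem.Str.join "\n" html

-- ===== PRECONDITION & SPEC =====
def Spec_getToc (pageNums : List Int) (out : String) : Prop := out = getToc_alt pageNums
instance (pageNums : List Int) (out : String) : Decidable (Spec_getToc pageNums out) := by unfold Spec_getToc; infer_instance

-- ===== CLAIM (what is proved, stated in full; the proofs are below) =====
def Claim_equal_getToc : Prop := ∀ (pageNums : List Int), Dom_getToc pageNums → Spec_getToc pageNums (getToc pageNums)

-- ===== LEMMAS AND PROOFS =====

-- A's fold ignores the enumerate index
def pvStep' (st : List String × Int) (n : Int) : List String × Int := pvStepA st (0, n)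

lemma pvFoldA_enum (l : List Int) (s : Int) (st : List String × Int) :
    (PySem.List.enumerate l s).foldl pvStepA st = l.foldl pvStep' st := by
  induction l generalizing s st with
  | nil => simp [PySem.List.enumerate_nil]
  | cons a t ih =>
      rw [PySem.List.enumerate_cons]
      simp only [List.foldl_cons]
      rw [ih]
      rfl

lemma pvSmall (l : List Int) (html : List String) (j : Int)
    (hj : 0 ≤ j) (hle : j + l.length ≤ 60) :
    l.foldl pvStep' (html, j) = (html ++ l.map pvEntry, j + l.length) := by
  induction l generalizing html j with
  | nil => simp
  | cons a t ih =>
      have hne : (j == (60 : Int)) = false := by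
        simp only [List.length_cons] at hle
        simp; omega
      simp only [List.foldl_cons, pvStep', pvStepA, hne, Bool.false_eq_true, if_false]
      rw [ih (html ++ [pvEntry a]) (j + 1) (by omega)
            (by simp only [List.length_cons] at hle; push_cast at hle ⊢; omega)]
      simp only [List.length_cons, List.map_cons, List.append_assoc, List.cons_append,
        List.nil_append]
      rw [Prod.mk.injEq]
      exact ⟨rfl, by push_cast; ring⟩

lemma pvStep60 (m : List Int) (hm : m ≠ []) (html : List String) :
    m.foldl pvStep' (html, 60) =
      m.foldl pvStep' (html ++ ["</div>\n<div class=\"toc\">"], 0) := by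
  cases m with
  | nil => exact absurd rfl hm
  | cons a t => simp [pvStep', pvStepA]

lemma pvFoldl_map (l : List Int) (html : List String) :
    l.foldl (fun acc n => acc ++ [pvEntry n]) html = html ++ l.map pvEntry := by
  induction l generalizing html with
  | nil => simp
  | cons a t ih => simp [ih]

lemma pvLoopB_nil (html : List String) (b : Bool) : pvLoopB [] html b = html := by
  rw [pvLoopB]; simp

lemma pvLoopB_cons (m : List Int) (hm : m ≠ []) (html : List String) :
    pvLoopB m html true = pvLoopB (m.drop 60) (html ++ (m.take 60).map pvEntry) false := by
  conv_lhs => rw [pvLoopB]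
  rw [dif_neg hm]
  simp only [reduceIte]
  rw [PySem.List.slice_to _ (by omega : (0:Int) ≤ 60),
      PySem.List.slice_from _ (by omega : (0:Int) ≤ 60), pvFoldl_map]
  have h60 : (60:Int).toNat = 60 := rfl
  simp [h60, List.map_take]

lemma pvLoopB_false (m : List Int) (hm : m ≠ []) (html : List String) :
    pvLoopB m html false = pvLoopB m (html ++ ["</div>\n<div class=\"toc\">"]) true := by
  conv_lhs => rw [pvLoopB]
  conv_rhs => rw [pvLoopB]
  rw [dif_neg hm, dif_neg hm]
  simp only [reduceIte, Bool.false_eq_true, if_false]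

lemma pvMain (n : ℕ) : ∀ (l : List Int), l.length ≤ n → ∀ html,
    (l.foldl pvStep' (html, 0)).1 = pvLoopB l html true := by
  induction n with
  | zero =>
      intro l hl html
      have : l = [] := List.eq_nil_of_length_eq_zero (Nat.le_zero.mp hl)
      subst this
      rw [pvLoopB_nil]; simp
  | succ n ih =>
      intro l hl html
      by_cases hnil : l = []
      · subst hnil; rw [pvLoopB_nil]; simp
      by_cases hsmall : l.length ≤ 60
      · rw [pvSmall l html 0 le_rfl (by omega),
           pvLoopB_cons l hnil html,
           List.take_of_length_le hsmall,
           List.drop_eq_nil_iff.mpr hsmall,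
           pvLoopB_nil]
      · -- large case: split off the first 60 elements
        have hsmall' : 60 < l.length := not_le.mp hsmall
        have hlen60 : (l.take 60).length = 60 := by simp; omega
        have hdropne : l.drop 60 ≠ [] := by
          simp only [ne_eq, List.drop_eq_nil_iff]; omega
        conv_lhs => rw [(List.take_append_drop 60 l).symm, List.foldl_append]
        rw [pvSmall (l.take 60) html 0 le_rfl (by rw [hlen60]; norm_num)]
        rw [hlen60]
        norm_num
        rw [pvStep60 (l.drop 60) hdropne,
            ih (l.drop 60) (by simp only [List.length_drop]; omega),
            pvLoopB_cons l hnil html,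
            pvLoopB_false (l.drop 60) hdropne]
        simp [List.map_take]

-- ===== VERDICT (by name: the statement is the Claim_ definition above) =====
theorem getToc_spec : Claim_equal_getToc := by
  intro pageNums _
  unfold Spec_getToc getToc getToc_alt
  simp only
  rw [pvFoldA_enum, pvMain pageNums.length pageNums le_rfl]
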